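-- pv_equiv track=rewrite | github.com/smallpythoncode/csci160 | project02/project02_kwj_csci160_spr22.py | dayOfSmallestDailyDifferece
-- ===== SOURCE A (Python) =====
-- def smallestDailyDifference (highTemps, lowTemps):
--     """Identifies the smallest difference in daily temperature.
--
--     :param highTemps: Highs
--     :param lowTemps: Lows
--     :return: The smallest daily temp. difference for target month.
--     :rtype: int
--     """
--     smallestDifference = 999999999999999999999999999999999999999999999999999999
--     if len(highTemps) == len(lowTemps):
--         for i in range(len(highTemps)):
--             currentDifference = highTemps[i] - lowTemps[i]
--             if currentDifference < smallestDifference: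
--                 smallestDifference = currentDifference
--
--     return smallestDifference
--
-- def dayOfSmallestDailyDifferece (highTemps, lowTemps):
--     """Identifies the day of the smallest difference in temperature.
--
--     :param list highTemps: Highs
--     :param list lowTemps: Lows
--     :return: Days of smallest difference in daily temp. for target month
--     :rtype: list[int]
--     """
--     days = []
--     smallestDifference = smallestDailyDifference(highTemps, lowTemps)
--     if len(highTemps) == len(lowTemps):
--         for i in range(len(highTemps)):
--             if (highTemps[i] - lowTemps[i]) == smallestDifference:
--                 days.append(i + 1)
--
--     return days
-- ===== SOURCE B (Python) =====
-- def dayOfSmallestDailyDifferece(highTemps, lowTemps):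
--     """Single pass: maintain the running smallest difference and its day list together."""
--     best = 999999999999999999999999999999999999999999999999999999
--     days = []
--     if len(highTemps) == len(lowTemps):
--         for i in range(len(highTemps)):
--             d = highTemps[i] - lowTemps[i]
--             if d < best:
--                 best = d
--                 days = [i + 1]
--             elif d == best:
--                 days.append(i + 1)
--     return days
-- ===== Notes on version B (the rewrite author's own statement) =====
-- stated objective: alternative
-- what changed: B finds the minimum difference and collects its days in one fused pass carrying (best, days), instead of A's two full scans (min pass, then a rescan comparing against the min).
import Mathlib
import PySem

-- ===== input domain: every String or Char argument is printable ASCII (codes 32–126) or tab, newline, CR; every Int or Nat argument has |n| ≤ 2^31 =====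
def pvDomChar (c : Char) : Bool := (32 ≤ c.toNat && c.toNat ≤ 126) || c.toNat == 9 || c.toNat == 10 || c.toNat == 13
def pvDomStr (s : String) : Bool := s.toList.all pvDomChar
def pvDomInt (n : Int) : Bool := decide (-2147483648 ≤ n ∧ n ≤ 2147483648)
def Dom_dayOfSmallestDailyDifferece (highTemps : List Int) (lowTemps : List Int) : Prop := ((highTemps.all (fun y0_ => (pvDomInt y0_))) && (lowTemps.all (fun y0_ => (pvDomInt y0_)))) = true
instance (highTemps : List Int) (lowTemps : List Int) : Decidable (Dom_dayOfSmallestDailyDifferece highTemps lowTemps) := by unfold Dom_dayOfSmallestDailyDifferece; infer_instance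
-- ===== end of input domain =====

-- ===== PORT A =====
-- A: two passes — first find the smallest high-low difference, then rescan for its days.
-- B: one fused pass maintaining (best, days) together. Equivalence proved for all inputs.
-- (pyGetD is exact here: every index produced by pyRange 0 len 1 is in range, so no IndexError.)
def smallestDailyDifference (highTemps : List Int) (lowTemps : List Int) : Int :=
  let smallestDifference : Int := 999999999999999999999999999999999999999999999999999999
  if highTemps.length == lowTemps.length then
    (PySem.List.pyRange 0 (highTemps.length : Int) 1).foldl
      (fun smallest i =>
        let currentDifference := PySem.List.pyGetD highTemps i 0 - PySem.List.pyGetD lowTemps i 0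
        if currentDifference < smallest then currentDifference else smallest)
      smallestDifference
  else smallestDifference

def dayOfSmallestDailyDifferece (highTemps : List Int) (lowTemps : List Int) : List Int :=
  let smallestDifference := smallestDailyDifference highTemps lowTemps
  if highTemps.length == lowTemps.length then
    (PySem.List.pyRange 0 (highTemps.length : Int) 1).foldl
      (fun days i =>
        if PySem.List.pyGetD highTemps i 0 - PySem.List.pyGetD lowTemps i 0 = smallestDifference
        then days ++ [i + 1] else days)
      []
  else []

-- ===== PORT B =====
def dayOfSmallestDailyDifferece_alt (highTemps : List Int) (lowTemps : List Int) : List Int :=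
  let init : Int × List Int := (999999999999999999999999999999999999999999999999999999, [])
  (if highTemps.length == lowTemps.length then
    (PySem.List.pyRange 0 (highTemps.length : Int) 1).foldl
      (fun st i =>
        let d := PySem.List.pyGetD highTemps i 0 - PySem.List.pyGetD lowTemps i 0
        if d < st.1 then (d, [i + 1])
        else if d = st.1 then (st.1, st.2 ++ [i + 1])
        else st)
      init
  else init).2

-- ===== PRECONDITION & SPEC =====
def Spec_dayOfSmallestDailyDifferece (highTemps : List Int) (lowTemps : List Int) (out : List Int) : Prop := out = dayOfSmallestDailyDifferece_alt highTemps lowTemps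
instance (highTemps : List Int) (lowTemps : List Int) (out : List Int) : Decidable (Spec_dayOfSmallestDailyDifferece highTemps lowTemps out) := by unfold Spec_dayOfSmallestDailyDifferece; infer_instance

-- ===== CLAIM (what is proved, stated in full; the proofs are below) =====
def Claim_equal_dayOfSmallestDailyDifferece : Prop := ∀ (highTemps : List Int) (lowTemps : List Int), Dom_dayOfSmallestDailyDifferece highTemps lowTemps → Spec_dayOfSmallestDailyDifferece highTemps lowTemps (dayOfSmallestDailyDifferece highTemps lowTemps)

-- ===== LEMMAS AND PROOFS =====

-- A's min fold never increases the accumulator.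
theorem pvFoldMin_le (f : Int → Int) (idxs : List Int) (b : Int) :
    idxs.foldl (fun m i => if f i < m then f i else m) b ≤ b := by
  induction idxs generalizing b with
  | nil => simp
  | cons i rest ih =>
    simp only [List.foldl_cons]
    by_cases h : f i < b
    · simp only [if_pos h]; exact le_trans (ih (f i)) (le_of_lt h)
    · simp only [if_neg h]; exact ih b

-- The collecting fold appends to its accumulator.
theorem pvCollect_acc (f : Int → Int) (v : Int) (idxs : List Int) (acc : List Int) :
    idxs.foldl (fun days i => if f i = v then days ++ [i + 1] else days) acc
      = acc ++ idxs.foldl (fun days i => if f i = v then days ++ [i + 1] else days) [] := by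
  induction idxs generalizing acc with
  | nil => simp
  | cons i rest ih =>
    simp only [List.foldl_cons]
    by_cases h : f i = v
    · simp only [if_pos h, List.nil_append]
      rw [ih (acc ++ [i + 1]), ih [i + 1]]; simp
    · simp only [if_neg h]
      exact ih acc

-- Invariant: B's fused fold equals (A's min fold, days that attain it).
theorem pvFused_eq (f : Int → Int) (idxs : List Int) (b : Int) (ds : List Int) :
    idxs.foldl (fun (st : Int × List Int) i =>
        if f i < st.1 then (f i, [i + 1])
        else if f i = st.1 then (st.1, st.2 ++ [i + 1])
        else st) (b, ds)
    = (idxs.foldl (fun m i => if f i < m then f i else m) b,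
       (if idxs.foldl (fun m i => if f i < m then f i else m) b < b then [] else ds)
         ++ idxs.foldl (fun days i =>
              if f i = idxs.foldl (fun m i => if f i < m then f i else m) b
              then days ++ [i + 1] else days) []) := by
  induction idxs generalizing b ds with
  | nil => simp
  | cons i rest ih =>
    simp only [List.foldl_cons]
    by_cases h1 : f i < b
    · simp only [if_pos h1]
      rw [ih (f i) [i + 1]]
      have hm := pvFoldMin_le f rest (f i)
      set m := rest.foldl (fun m i => if f i < m then f i else m) (f i) with hmdef
      have hmb : m < b := lt_of_le_of_lt hm h1
      simp only [if_pos hmb]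
      by_cases h2 : m < f i
      · have hne : ¬ f i = m := by omega
        simp only [if_pos h2, if_neg hne, List.nil_append]
      · have heq : f i = m := le_antisymm (by omega) hm
        simp only [if_neg h2, if_pos heq, List.nil_append]
        rw [pvCollect_acc f m rest [i + 1]]
    · simp only [if_neg h1]
      by_cases h2 : f i = b
      · simp only [if_pos h2]
        rw [ih b (ds ++ [i + 1])]
        have hm := pvFoldMin_le f rest b
        set m := rest.foldl (fun m i => if f i < m then f i else m) b with hmdef
        by_cases h3 : m < b
        · have hne : ¬ f i = m := by omega
          simp only [if_pos h3, if_neg hne, List.nil_append]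
        · have heq : m = b := le_antisymm hm (by omega)
          have hfi : f i = m := by omega
          simp only [if_neg h3, if_pos hfi, List.nil_append]
          rw [pvCollect_acc f m rest [i + 1]]
          simp
      · simp only [if_neg h2]
        rw [ih b ds]
        have hne : ¬ f i = rest.foldl (fun m i => if f i < m then f i else m) b := by
          have := pvFoldMin_le f rest b
          omega
        simp only [if_neg hne]

-- ===== VERDICT (by name: the statement is the Claim_ definition above) =====
theorem dayOfSmallestDailyDifferece_spec : Claim_equal_dayOfSmallestDailyDifferece := by
  intro highTemps lowTemps _
  unfold Spec_dayOfSmallestDailyDifferece dayOfSmallestDailyDifferece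
    dayOfSmallestDailyDifferece_alt smallestDailyDifference
  by_cases h : highTemps.length == lowTemps.length
  · simp only [h, if_true]
    rw [pvFused_eq (fun i => PySem.List.pyGetD highTemps i 0 - PySem.List.pyGetD lowTemps i 0)]
    simp
  · simp [h]
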